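-- pv_equiv track=rewrite | github.com/AkashKalme/LP-IV | IR/Assignment4.py | reducer
-- ===== SOURCE A (Python) =====
-- def reducer(mapped_data):
--     letter_counts = {}
--     for letter, count in mapped_data:
--         if letter in letter_counts:
--             letter_counts[letter] += count
--         else:
--             letter_counts[letter] = count
--     return letter_counts
-- ===== SOURCE B (Python) =====
-- def reducer(mapped_data):
--     # Two-phase: dedup the keys in first-occurrence order, then one summing scan per key.
--     return {k: sum(c for kk, c in mapped_data if kk == k)
--             for k in dict.fromkeys(kk for kk, _ in mapped_data)}
-- ===== Notes on version B (the rewrite author's own statement) =====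
-- stated objective: alternative
-- what changed: Replaces the incremental dict-accumulation loop by a key-dedup pass followed by an independent summing scan per distinct key, written as one dict comprehension.
import Mathlib
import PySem

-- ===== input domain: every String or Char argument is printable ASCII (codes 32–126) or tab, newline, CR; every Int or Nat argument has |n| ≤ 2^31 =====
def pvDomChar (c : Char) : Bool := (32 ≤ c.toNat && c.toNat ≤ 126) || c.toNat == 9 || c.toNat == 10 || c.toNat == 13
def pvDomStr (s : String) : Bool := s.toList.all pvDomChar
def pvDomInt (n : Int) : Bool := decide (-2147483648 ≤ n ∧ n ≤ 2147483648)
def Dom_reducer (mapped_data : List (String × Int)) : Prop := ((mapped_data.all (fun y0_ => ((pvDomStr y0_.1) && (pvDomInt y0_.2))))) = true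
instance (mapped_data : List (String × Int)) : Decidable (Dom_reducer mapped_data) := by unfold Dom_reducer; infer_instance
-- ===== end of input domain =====

-- B replaces A's incremental dict accumulation by a key-dedup pass plus one summing scan per distinct key (alternative decomposition, same result).

-- ===== PORT A =====
-- the body of A's for-loop: membership test, then += or fresh assignment
def reducerStep (d : PySem.Dict String Int) (lc : String × Int) : PySem.Dict String Int :=
  if d.contains lc.1 then
    d.insert lc.1 (d.getD lc.1 0 + lc.2)
  else
    d.insert lc.1 lc.2

def reducer (mapped_data : List (String × Int)) : List (String × Int) :=
  (mapped_data.foldl reducerStep (PySem.Dict.mk [])).items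

-- ===== PORT B =====
def reducer_alt (mapped_data : List (String × Int)) : List (String × Int) :=
  (PySem.List.dedup (mapped_data.map Prod.fst)).map
    (fun k => (k, ((mapped_data.filter (fun p => p.1 == k)).map Prod.snd).sum))

-- ===== PRECONDITION & SPEC =====
def Spec_reducer (mapped_data : List (String × Int)) (out : List (String × Int)) : Prop := out = reducer_alt mapped_data
instance (mapped_data : List (String × Int)) (out : List (String × Int)) : Decidable (Spec_reducer mapped_data out) := by unfold Spec_reducer; infer_instance

-- ===== CLAIM (what is proved, stated in full; the proofs are below) =====
def Claim_equal_reducer : Prop := ∀ (mapped_data : List (String × Int)), Dom_reducer mapped_data → Spec_reducer mapped_data (reducer mapped_data)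

-- ===== LEMMAS AND PROOFS =====

-- total count for one key (B's inner sum)
def pvS (xs : List (String × Int)) (k : String) : Int :=
  ((xs.filter (fun p => p.1 == k)).map Prod.snd).sum

-- first-occurrence dedup relative to an already-seen set
def pvFd (seen : List String) : List String → List String
  | [] => []
  | k :: ks => if k ∈ seen then pvFd seen ks else k :: pvFd (k :: seen) ks

theorem pvS_cons (k : String) (c : Int) (xs : List (String × Int)) (k' : String) :
    pvS ((k, c) :: xs) k' = if k = k' then c + pvS xs k' else pvS xs k' := by
  by_cases h : k = k' <;> simp [pvS, h]

theorem pvFd_congr : ∀ (xs s t : List String), (∀ a, a ∈ s ↔ a ∈ t) → pvFd s xs = pvFd t xs := by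
  intro xs
  induction xs with
  | nil => intro s t _; rfl
  | cons k ks ih =>
      intro s t h
      simp only [pvFd]
      by_cases hk : k ∈ s
      · rw [if_pos hk, if_pos ((h k).mp hk), ih s t h]
      · rw [if_neg hk, if_neg (fun hkt => hk ((h k).mpr hkt))]
        rw [ih (k :: s) (k :: t) (by intro a; simp [h a])]

theorem pvFd_not_seen : ∀ (xs seen : List String) (a : String), a ∈ pvFd seen xs → a ∉ seen := by
  intro xs
  induction xs with
  | nil => intro seen a h; simp [pvFd] at h
  | cons k ks ih =>
      intro seen a h
      simp only [pvFd] at h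
      by_cases hk : k ∈ seen
      · rw [if_pos hk] at h; exact ih seen a h
      · rw [if_neg hk] at h
        rcases List.mem_cons.mp h with rfl | h
        · exact hk
        · exact fun ha => ih (k :: seen) a h (List.mem_cons_of_mem _ ha)

theorem foldl_add_eq : ∀ (xs s : List String),
    List.foldl PySem.Set.add s xs = s ++ pvFd s xs := by
  intro xs
  induction xs with
  | nil => intro s; simp [pvFd]
  | cons k ks ih =>
      intro s
      simp only [List.foldl_cons, PySem.Set.add, pvFd]
      by_cases hk : k ∈ s
      · rw [if_pos (by simpa using hk), if_pos hk, ih s]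
      · rw [if_neg (by simpa using hk), if_neg hk, ih (s ++ [k])]
        rw [pvFd_congr ks (s ++ [k]) (k :: s) (by intro a; simp [or_comm])]
        simp

theorem key_unique : ∀ (l : List (String × Int)), (l.map Prod.fst).Nodup →
    ∀ p ∈ l, List.find? (fun q => q.1 == p.1) l = some p := by
  intro l
  induction l with
  | nil => intro _ p hp; simp at hp
  | cons q l ih =>
      intro hnd p hp
      simp only [List.map_cons, List.nodup_cons] at hnd
      rcases List.mem_cons.mp hp with rfl | hp
      · simp
      · have hne : (q.1 == p.1) = false := by
          simp only [beq_eq_false_iff_ne, ne_eq]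
          intro h; exact hnd.1 (h ▸ List.mem_map_of_mem hp)
        simp only [List.find?_cons, hne]
        exact ih hnd.2 p hp

-- keys of A's dict are unchanged by the overwrite branch
theorem keys_insert_mem (d : PySem.Dict String Int) (k : String) (v : Int)
    (hc : d.contains k = true) :
    (d.insert k v).items.map Prod.fst = d.items.map Prod.fst := by
  simp only [PySem.Dict.insert, hc, if_pos]
  rw [List.map_map]
  apply List.map_congr_left
  intro p _
  by_cases h : p.1 = k <;> simp [h]

theorem contains_false_ne (d : PySem.Dict String Int) (k : String)
    (hc : d.contains k = false) : ∀ p ∈ d.items, p.1 ≠ k := by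
  intro p hp
  simp only [PySem.Dict.contains, List.any_eq_false] at hc
  simpa using hc p hp

-- the invariant of A's loop: dict entries get the remaining per-key sums added,
-- and the unseen keys are appended in first-occurrence order with their sums
theorem foldA : ∀ (xs : List (String × Int)) (d : PySem.Dict String Int),
    ((d.items.map Prod.fst).Nodup) →
    (xs.foldl reducerStep d).items =
      d.items.map (fun p => (p.1, p.2 + pvS xs p.1)) ++
      (pvFd (d.items.map Prod.fst) (xs.map Prod.fst)).map (fun k => (k, pvS xs k)) := by
  intro xs
  induction xs with
  | nil =>
      intro d _
      simp [pvS, pvFd]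
  | cons kc xs ih =>
      intro d hnd
      obtain ⟨k, c⟩ := kc
      simp only [List.foldl_cons, List.map_cons]
      by_cases hc : d.contains k = true
      · -- overwrite branch
        have hstep : reducerStep d (k, c) = d.insert k (d.getD k 0 + c) := by
          simp [reducerStep, hc]
        rw [hstep]
        have hkeys := keys_insert_mem d k (d.getD k 0 + c) hc
        rw [ih _ (by rw [hkeys]; exact hnd), hkeys]
        have hkmem : k ∈ d.items.map Prod.fst := by
          simp only [PySem.Dict.contains, List.any_eq_true] at hc
          obtain ⟨p, hp, hpk⟩ := hc
          exact List.mem_map.mpr ⟨p, hp, by simpa using hpk⟩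
        congr 1
        · -- first parts agree entrywise
          simp only [PySem.Dict.insert, hc, if_pos, List.map_map]
          apply List.map_congr_left
          intro p hp
          by_cases h : p.1 = k
          · have hval : d.getD k 0 = p.2 := by
              have := key_unique d.items hnd p hp
              simp [PySem.Dict.getD, PySem.Dict.get?, h ▸ this]
            simp only [Function.comp, h, beq_self_eq_true, if_pos]
            rw [pvS_cons]
            simp [hval, add_assoc, add_comm c]
          · have hb : (p.1 == k) = false := by simp [h]
            simp only [Function.comp, hb, Bool.false_eq_true, if_false]
            rw [pvS_cons, if_neg (fun hh => h hh.symm)]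
        · -- second parts: k already seen
          simp only [pvFd, if_pos hkmem]
          apply List.map_congr_left
          intro k' hk'
          have : k' ∉ d.items.map Prod.fst := pvFd_not_seen _ _ _ hk'
          rw [pvS_cons, if_neg (fun h => this (by rw [← h]; exact hkmem))]
      · -- fresh-key branch
        have hcf : d.contains k = false := by simpa using hc
        have hstep : reducerStep d (k, c) = d.insert k c := by
          simp [reducerStep, hcf]
        rw [hstep]
        have hitems : (d.insert k c).items = d.items ++ [(k, c)] := by
          simp [PySem.Dict.insert, hcf]
        have hkeys : (d.insert k c).items.map Prod.fst = d.items.map Prod.fst ++ [k] := by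
          simp [hitems]
        have hknot : k ∉ d.items.map Prod.fst := by
          intro hmem
          obtain ⟨p, hp, hpk⟩ := List.mem_map.mp hmem
          exact contains_false_ne d k hcf p hp hpk
        have hnd' : (d.items.map Prod.fst ++ [k]).Nodup := by
          refine hnd.append (List.nodup_singleton k) ?_
          intro a ha hb
          rw [List.mem_singleton] at hb
          exact hknot (hb ▸ ha)
        rw [ih _ (by rw [hkeys]; exact hnd'), hkeys, hitems]
        rw [pvFd_congr (xs.map Prod.fst) (d.items.map Prod.fst ++ [k]) (k :: d.items.map Prod.fst)
              (by intro a; simp [or_comm])]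
        simp only [pvFd, if_neg hknot, List.map_cons, List.map_append]
        rw [List.append_assoc]
        congr 1
        · apply List.map_congr_left
          intro p hp
          rw [pvS_cons, if_neg (fun h => contains_false_ne d k hcf p hp h.symm)]
        · simp only [List.cons_append]
          congr 1
          · rw [pvS_cons, if_pos rfl]
          · apply List.map_congr_left
            intro k' hk'
            have : k' ∉ k :: d.items.map Prod.fst := pvFd_not_seen _ _ _ hk'
            rw [pvS_cons, if_neg (fun h => this (by simp [← h]))]

-- ===== VERDICT (by name: the statement is the Claim_ definition above) =====
theorem reducer_spec : Claim_equal_reducer := by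
  intro xs _
  show reducer xs = reducer_alt xs
  rw [reducer, foldA xs (PySem.Dict.mk []) (by simp)]
  simp only [List.map_nil, List.nil_append]
  rw [reducer_alt]
  have : PySem.List.dedup (xs.map Prod.fst) = pvFd [] (xs.map Prod.fst) := by
    rw [PySem.List.dedup, PySem.Set.ofList, foldl_add_eq]
    rfl
  rw [this]
  rfl
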